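-- pv_equiv track=rewrite | github.com/diaoyong3777/SYMBXRL | A2-MIMOResourceScheduler/SAC/smartfunc.py | sel_ue
-- ===== SOURCE A (Python) =====
-- from itertools import combinations
--
-- def sel_ue(action):
--     '''
--     Converting Action into User Indexed Action
--     '''
--     user_set = [0,1,2,3,4,5,6]
--     sum_before = 0
--     # ue_select = []
--     # idx = 0
--     for i in range (1,8):
--         sum_before += len(list(combinations(user_set, i)))
--         if ((action+1)>sum_before):
--             continue
--         else:
--             idx = i
--             sum_before -= len(list(combinations(user_set, i)))
--             ue_select = list(combinations(user_set, i))[action-sum_before]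
--             break
--     return ue_select,idx
-- ===== SOURCE B (Python) =====
-- from itertools import combinations
--
-- def sel_ue(action):
--     '''
--     Converting Action into User Indexed Action
--     '''
--     user_set = [0, 1, 2, 3, 4, 5, 6]
--     all_combos = []
--     for i in range(1, 8):
--         all_combos.extend(combinations(user_set, i))
--     ue_select = all_combos[action]
--     return ue_select, len(ue_select)
-- ===== Notes on version B (the rewrite author's own statement) =====
-- stated objective: simpler
-- what changed: B builds the flat list of all 127 combinations once and indexes it directly, taking idx = len(ue_select), removing A's cumulative sum_before block search and loop-counter bookkeeping.
-- outside the precondition, e.g. on sel_ue(-1): A returns ((6,), 1), B returns ((0, 1, 2, 3, 4, 5, 6), 7); on sel_ue(127): A raises UnboundLocalError, B raises IndexError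
import Mathlib
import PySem

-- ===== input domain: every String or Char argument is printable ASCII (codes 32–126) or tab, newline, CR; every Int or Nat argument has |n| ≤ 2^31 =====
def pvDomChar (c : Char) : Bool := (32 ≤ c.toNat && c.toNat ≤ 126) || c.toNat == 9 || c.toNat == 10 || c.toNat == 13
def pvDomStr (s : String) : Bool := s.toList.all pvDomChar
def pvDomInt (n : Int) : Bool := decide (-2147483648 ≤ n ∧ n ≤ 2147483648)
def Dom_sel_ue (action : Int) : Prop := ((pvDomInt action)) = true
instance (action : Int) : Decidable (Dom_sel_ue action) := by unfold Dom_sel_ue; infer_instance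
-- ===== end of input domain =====

-- B: build the flat list of all combinations once and index it directly (idx = length),
-- replacing A's cumulative sum_before block search — objective: simpler.


-- ===== PORT A =====
-- itertools.combinations(xs, k), in itertools (lexicographic-by-position) order
def combos : List Int → Nat → List (List Int)
  | _, 0 => [[]]
  | [], _ + 1 => []
  | x :: xs, k + 1 => (combos xs k).map (fun l => x :: l) ++ combos xs (k + 1)

-- the for-loop of A over i in range(1,8), with state sum_before; none = no break (UnboundLocalError) or IndexError
def selLoopA (action : Int) : Int → List Nat → Option (List Int × Int)
  | _, [] => none
  | sumBefore, i :: rest =>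
    let block := combos [0, 1, 2, 3, 4, 5, 6] i
    let s := sumBefore + (block.length : Int)
    if action + 1 > s then selLoopA action s rest
    else (PySem.List.pyGet? block (action - sumBefore)).map (fun l => (l, (i : Int)))

def sel_ue (action : Int) : List Int × Int :=
  (selLoopA action 0 (List.range' 1 7)).getD ([], 0)

-- ===== PORT B =====
-- the flat list all_combos, extended block by block for i in range(1,8)
def allCombosB : List (List Int) :=
  (List.range' 1 7).foldl (fun acc i => acc ++ combos [0, 1, 2, 3, 4, 5, 6] i) []

def sel_ue_alt (action : Int) : List Int × Int :=
  match PySem.List.pyGet? allCombosB action with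
  | some l => (l, (l.length : Int))
  | none => ([], 0)

-- ===== PRECONDITION & SPEC =====
-- Pre_ excludes action ≥ 127, where A raises UnboundLocalError, and negative actions, where both
-- programs' negative-index wraparound is accidental (A wraps within the first block, B within the whole list).
def Pre_sel_ue (action : Int) : Prop := 0 ≤ action ∧ action ≤ 126
instance (action : Int) : Decidable (Pre_sel_ue action) := by unfold Pre_sel_ue; infer_instance
def pvWitness_sel_ue : Int := 10

def Spec_sel_ue (action : Int) (out : List Int × Int) : Prop := out = sel_ue_alt action
instance (action : Int) (out : List Int × Int) : Decidable (Spec_sel_ue action out) := by unfold Spec_sel_ue; infer_instance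

-- ===== CLAIM (what is proved, stated in full; the proofs are below) =====
def Claim_equal_sel_ue : Prop := ∀ (action : Int), Dom_sel_ue action → Pre_sel_ue action → Spec_sel_ue action (sel_ue action)

-- ===== LEMMAS AND PROOFS =====
set_option maxRecDepth 100000 in
theorem sel_ue_all127 :
    ((List.range 127).all (fun n => sel_ue (n : Int) == sel_ue_alt (n : Int))) = true := by decide

-- ===== VERDICT (by name: the statement is the Claim_ definition above) =====
theorem sel_ue_spec : Claim_equal_sel_ue := by
  intro action _ hpre
  unfold Spec_sel_ue
  obtain ⟨h0, h1⟩ := hpre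
  have hn : action = ((action.toNat : Nat) : Int) := by omega
  have hmem : action.toNat ∈ List.range 127 := by
    simp only [List.mem_range]; omega
  have := List.all_eq_true.mp sel_ue_all127 _ hmem
  rw [hn]
  exact eq_of_beq this
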